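-- pv_equiv track=rewrite | github.com/nathanielbd/aoc2024 | 22/first.py | get_secret_n
-- ===== SOURCE A (Python) =====
-- def get_secret_n(n: int, iters: int):
--     def mix(n: int, mixer: int):
--         return n ^ mixer
--     def prune(n: int):
--         return n & (2**24-1)
--     for _ in range(iters):
--         n = prune(mix(n, n << 6))
--         n = prune(mix(n, n >> 5))
--         n = prune(mix(n, n << 11))
--     return n
-- ===== SOURCE B (Python) =====
-- MASK = (1 << 24) - 1
--
--
-- def _step(x):
--     # one PRNG step (the same step the puzzle defines)
--     x = (x ^ (x << 6)) & MASK
--     x = (x ^ (x >> 5)) & MASK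
--     x = (x ^ (x << 11)) & MASK
--     return x
--
--
-- def _matvec(cols, v):
--     # apply the GF(2) matrix given by its 24 column bitmasks to vector v
--     out = 0
--     for i in range(24):
--         if (v >> i) & 1:
--             out ^= cols[i]
--     return out
--
--
-- def _matmul(a, b):
--     # compose: column i of the product is a applied to column i of b
--     return [_matvec(a, c) for c in b]
--
--
-- def get_secret_n(n: int, iters: int):
--     if iters <= 0:
--         return n
--     s = _step(n)  # one direct step brings the state into the 24-bit space
--     base = [_step(1 << i) for i in range(24)]   # matrix of the step map
--     res = [1 << i for i in range(24)]           # identity matrix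
--     k = iters - 1
--     while k:
--         if k % 2 == 1:
--             res = _matmul(res, base)
--         base = _matmul(base, base)
--         k //= 2
--     return _matvec(res, s)
-- ===== Notes on version B (the rewrite author's own statement) =====
-- stated objective: faster
-- what changed: B replaces A's loop of iters PRNG steps by exponentiation of the step map, which is GF(2)-linear on 24-bit states, represented as a 24-column bit matrix composed by square-and-multiply (one direct step first brings arbitrary input into the 24-bit space).
import Mathlib
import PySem

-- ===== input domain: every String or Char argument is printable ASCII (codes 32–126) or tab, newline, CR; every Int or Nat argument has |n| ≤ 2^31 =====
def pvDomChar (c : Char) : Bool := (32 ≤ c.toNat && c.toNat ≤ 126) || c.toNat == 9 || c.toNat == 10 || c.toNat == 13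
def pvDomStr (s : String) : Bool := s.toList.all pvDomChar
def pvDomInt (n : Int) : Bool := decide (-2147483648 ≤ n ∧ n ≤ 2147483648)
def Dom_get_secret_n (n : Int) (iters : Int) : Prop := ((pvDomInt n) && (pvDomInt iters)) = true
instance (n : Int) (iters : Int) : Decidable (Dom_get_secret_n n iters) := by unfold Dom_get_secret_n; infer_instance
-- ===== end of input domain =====

-- B replaces A's O(iters) loop by exponentiation of the GF(2)-linear step map as a 24-column bit matrix (O(log iters) squarings); measured faster at large iters.

-- ===== PORT A =====
def pvMix (n : Int) (mixer : Int) : Int := PySem.Int.bxor n mixer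

def pvPrune (n : Int) : Int := PySem.Int.band n (2 ^ 24 - 1)

def get_secret_n (n : Int) (iters : Int) : Int :=
  (PySem.List.pyRange 0 iters 1).foldl
    (fun n _ =>
      let n1 := pvPrune (pvMix n (n <<< (6 : Nat)))
      let n2 := pvPrune (pvMix n1 (n1 >>> (5 : Nat)))
      pvPrune (pvMix n2 (n2 <<< (11 : Nat)))) n

-- ===== PORT B =====
def pvMASK : Int := (1 <<< (24 : Nat)) - 1

-- Source B _step: one PRNG step
def pvStep (x : Int) : Int :=
  let x1 := PySem.Int.band (PySem.Int.bxor x (x <<< (6 : Nat))) pvMASK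
  let x2 := PySem.Int.band (PySem.Int.bxor x1 (x1 >>> (5 : Nat))) pvMASK
  PySem.Int.band (PySem.Int.bxor x2 (x2 <<< (11 : Nat))) pvMASK

-- Source B _matvec: all ints involved are nonnegative 24-bit values, so Nat's bitwise ops are exact
def pvMatvec (cols : List Nat) (v : Nat) : Nat :=
  (List.range 24).foldl (fun out i => if (v >>> i) &&& 1 = 1 then out ^^^ cols.getD i 0 else out) 0

-- Source B _matmul
def pvMatmul (a : List Nat) (b : List Nat) : List Nat := b.map (pvMatvec a)

-- Source B while-loop: square-and-multiply on the exponent k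
def pvPowLoop (base : List Nat) (res : List Nat) (k : Nat) : List Nat :=
  if k = 0 then res
  else pvPowLoop (pvMatmul base base) (if k % 2 = 1 then pvMatmul res base else res) (k / 2)
  termination_by k
  decreasing_by omega

def get_secret_n_alt (n : Int) (iters : Int) : Int :=
  if iters ≤ 0 then n
  else
    let s := pvStep n
    let base := (List.range 24).map (fun (i : Nat) => (pvStep ((1 : Int) <<< i)).toNat)
    let res := (List.range 24).map (fun i => (1 : Nat) <<< i)
    Int.ofNat (pvMatvec (pvPowLoop base res (iters.toNat - 1)) s.toNat)

-- ===== PRECONDITION & SPEC =====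
def Spec_get_secret_n (n : Int) (iters : Int) (out : Int) : Prop := out = get_secret_n_alt n iters
instance (n : Int) (iters : Int) (out : Int) : Decidable (Spec_get_secret_n n iters out) := by unfold Spec_get_secret_n; infer_instance

-- ===== CLAIM (what is proved, stated in full; the proofs are below) =====
def Claim_equal_get_secret_n : Prop := ∀ (n : Int) (iters : Int), Dom_get_secret_n n iters → Spec_get_secret_n n iters (get_secret_n n iters)

-- ===== LEMMAS AND PROOFS =====

-- Nat model of one step (pvStep restricted to nonnegative values)
def pvStepN (a : Nat) : Nat :=
  let x1 := (a ^^^ a <<< 6) &&& 16777215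
  let x2 := (x1 ^^^ x1 >>> 5) &&& 16777215
  (x2 ^^^ x2 <<< 11) &&& 16777215

theorem pv_s1_lin (x y : Nat) : ((x ^^^ y) ^^^ (x ^^^ y) <<< 6) &&& 16777215
    = ((x ^^^ x <<< 6) &&& 16777215) ^^^ ((y ^^^ y <<< 6) &&& 16777215) := by
  rw [← Nat.and_xor_distrib_right, Nat.shiftLeft_xor_distrib]
  congr 1
  simp [Nat.xor_assoc, Nat.xor_comm, Nat.xor_left_comm]

theorem pv_s2_lin (x y : Nat) : ((x ^^^ y) ^^^ (x ^^^ y) >>> 5) &&& 16777215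
    = ((x ^^^ x >>> 5) &&& 16777215) ^^^ ((y ^^^ y >>> 5) &&& 16777215) := by
  rw [← Nat.and_xor_distrib_right, Nat.shiftRight_xor_distrib]
  congr 1
  simp [Nat.xor_assoc, Nat.xor_comm, Nat.xor_left_comm]

theorem pv_s3_lin (x y : Nat) : ((x ^^^ y) ^^^ (x ^^^ y) <<< 11) &&& 16777215
    = ((x ^^^ x <<< 11) &&& 16777215) ^^^ ((y ^^^ y <<< 11) &&& 16777215) := by
  rw [← Nat.and_xor_distrib_right, Nat.shiftLeft_xor_distrib]
  congr 1
  simp [Nat.xor_assoc, Nat.xor_comm, Nat.xor_left_comm]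

theorem pvStepN_lin (x y : Nat) : pvStepN (x ^^^ y) = pvStepN x ^^^ pvStepN y := by
  simp only [pvStepN, pv_s1_lin, pv_s2_lin, pv_s3_lin]

theorem pvStepN_lt (a : Nat) : pvStepN a < 16777216 := by
  have : pvStepN a ≤ 16777215 := Nat.and_le_right
  omega

theorem pv_cast_shl (a k : Nat) : ((a : Int) <<< k) = ((a <<< k : Nat) : Int) := rfl
theorem pv_cast_shr (a k : Nat) : ((a : Int) >>> k) = ((a >>> k : Nat) : Int) := rfl
theorem pv_mask_cast : pvMASK = ((16777215 : Nat) : Int) := rfl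

theorem pvStep_natCast (a : Nat) : pvStep (a : Int) = ((pvStepN a : Nat) : Int) := by
  simp only [pvStep, pvStepN, pv_mask_cast, pv_cast_shl, pv_cast_shr,
    PySem.Int.bxor_natCast, PySem.Int.band_natCast]

theorem pv_band_mask_bounds (y : Int) :
    0 ≤ PySem.Int.band y pvMASK ∧ PySem.Int.band y pvMASK ≤ 16777215 := by
  have hm : pvMASK = (16777215 : Int) := rfl
  rw [hm]
  unfold PySem.Int.band
  split_ifs with h1 h2 h2
  · have h := Nat.and_le_right (n := y.toNat) (m := (16777215 : Int).toNat)
    constructor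
    · positivity
    · have : y.toNat &&& (16777215 : Int).toNat ≤ 16777215 := by simpa using h
      omega
  · omega
  · have : (16777215 : Int).toNat - ((16777215 : Int).toNat &&& (-y - 1).toNat) ≤ 16777215 := by omega
    omega
  · omega

theorem pvStep_bounds (x : Int) : 0 ≤ pvStep x ∧ pvStep x < 16777216 := by
  simp only [pvStep]
  have := pv_band_mask_bounds (PySem.Int.bxor
    (PySem.Int.band (PySem.Int.bxor (PySem.Int.band (PySem.Int.bxor x (x <<< (6 : Nat))) pvMASK)
      (PySem.Int.band (PySem.Int.bxor x (x <<< (6 : Nat))) pvMASK >>> (5 : Nat))) pvMASK)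
    (PySem.Int.band (PySem.Int.bxor (PySem.Int.band (PySem.Int.bxor x (x <<< (6 : Nat))) pvMASK)
      (PySem.Int.band (PySem.Int.bxor x (x <<< (6 : Nat))) pvMASK >>> (5 : Nat))) pvMASK <<< (11 : Nat)))
  omega

theorem pv_foldl_const {α : Type} (l : List α) (f : Int → Int) (x : Int) :
    l.foldl (fun acc _ => f acc) x = f^[l.length] x := by
  induction l generalizing x with
  | nil => rfl
  | cons a t ih => simp [List.foldl, ih, Function.iterate_succ_apply]

theorem pv_pyRange_len (iters : Int) : (PySem.List.pyRange 0 iters 1).length = iters.toNat := by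
  simp [PySem.List.pyRange]
  omega

theorem pv_cond_testBit (v i : Nat) : ((v >>> i) &&& 1 = 1) ↔ v.testBit i := by
  simp [Nat.testBit, Nat.and_one_is_mod, Nat.one_and_eq_mod_two]

theorem pv_g_zero {g : Nat → Nat} (hlin : ∀ x y, g (x ^^^ y) = g x ^^^ g y) : g 0 = 0 := by
  have := hlin 0 0
  simp at this
  omega

theorem pv_testBit_one (j : Nat) : Nat.testBit 1 j = decide (j = 0) := by
  rcases j with _ | j
  · decide
  · simp [Nat.testBit_succ]

theorem pv_decomp (v k : Nat) :
    v % 2 ^ (k + 1) = (v % 2 ^ k) ^^^ (if v.testBit k then 1 <<< k else 0) := by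
  by_cases h : v.testBit k
  · rw [if_pos h]
    apply Nat.eq_of_testBit_eq
    intro i
    simp only [Nat.testBit_xor, Nat.testBit_mod_two_pow, Nat.testBit_shiftLeft, pv_testBit_one]
    rcases lt_trichotomy i k with hc | hc | hc
    · simp [hc, Nat.lt_succ_of_lt hc, show ¬ (i ≥ k) by omega]
    · subst hc
      simp [h]
    · simp [show ¬ i < k + 1 by omega, show ¬ i < k by omega, show i ≥ k by omega,
        show ¬ (i - k = 0) by omega]
  · rw [if_neg h]
    apply Nat.eq_of_testBit_eq
    intro i
    simp only [Nat.xor_zero, Nat.testBit_mod_two_pow]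
    rcases lt_trichotomy i k with hc | hc | hc
    · simp [hc, Nat.lt_succ_of_lt hc]
    · subst hc
      simp [h]
    · simp [show ¬ i < k + 1 by omega, show ¬ i < k by omega]

-- cols represents the GF(2)-linear map g on 24-bit states
def pvRep (cols : List Nat) (g : Nat → Nat) : Prop :=
  cols.length = 24 ∧ (∀ x y, g (x ^^^ y) = g x ^^^ g y) ∧ (∀ x, g x < 16777216) ∧
    (∀ i, i < 24 → cols.getD i 0 = g (1 <<< i))

theorem pvMatvec_rep {cols : List Nat} {g : Nat → Nat} (h : pvRep cols g) (v : Nat) :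
    pvMatvec cols v = g (v % 16777216) := by
  obtain ⟨hlen, hlin, hlt, hcol⟩ := h
  have key : ∀ k, k ≤ 24 →
      (List.range k).foldl (fun out i => if (v >>> i) &&& 1 = 1 then out ^^^ cols.getD i 0 else out) 0
        = g (v % 2 ^ k) := by
    intro k
    induction k with
    | zero =>
      intro _
      simp only [List.range_zero, List.foldl_nil, Nat.pow_zero, Nat.mod_one]
      exact (pv_g_zero hlin).symm
    | succ k ih =>
      intro hk
      rw [List.range_succ, List.foldl_append, ih (by omega)]
      simp only [List.foldl_cons, List.foldl_nil]
      rw [pv_decomp v k, hlin]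
      by_cases hb : v.testBit k
      · rw [if_pos ((pv_cond_testBit v k).mpr hb), if_pos hb, hcol k (by omega)]
      · rw [if_neg (by rw [pv_cond_testBit]; exact hb), if_neg hb, pv_g_zero hlin]
        simp
  have := key 24 (le_refl _)
  simpa [pvMatvec] using this

theorem pvMatmul_rep {a b : List Nat} {ga gb : Nat → Nat} (ha : pvRep a ga) (hb : pvRep b gb) :
    pvRep (pvMatmul a b) (fun v => ga (gb v)) := by
  obtain ⟨hbl, hblin, hblt, hbcol⟩ := hb
  refine ⟨by simp [pvMatmul, hbl], ?_, ?_, ?_⟩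
  · intro x y
    simp [hblin, ha.2.1]
  · intro x
    exact ha.2.2.1 _
  · intro i hi
    have hib : i < b.length := by omega
    rw [pvMatmul, List.getD_eq_getElem?_getD, List.getElem?_map, List.getElem?_eq_getElem hib]
    simp only [Option.map_some, Option.getD_some]
    rw [pvMatvec_rep ⟨ha.1, ha.2.1, ha.2.2.1, ha.2.2.2⟩]
    have hbi : b[i] = gb (1 <<< i) := by
      have := hbcol i hi
      rwa [List.getD_eq_getElem?_getD, List.getElem?_eq_getElem hib, Option.getD_some] at this
    rw [hbi, Nat.mod_eq_of_lt (hblt _)]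

theorem pvRep_congr {cols : List Nat} {g g' : Nat → Nat} (h : pvRep cols g)
    (he : ∀ v, g v = g' v) : pvRep cols g' := by
  obtain ⟨h1, h2, h3, h4⟩ := h
  exact ⟨h1, fun x y => by rw [← he, ← he, ← he, h2], fun x => by rw [← he]; exact h3 x,
    fun i hi => by rw [← he]; exact h4 i hi⟩

theorem pv_iter_sq (g : Nat → Nat) (j : Nat) (v : Nat) :
    (fun x => g (g x))^[j] v = g^[2 * j] v := by
  induction j generalizing v with
  | zero => rfl
  | succ j ih =>
    rw [Function.iterate_succ_apply, ih, show 2 * (j + 1) = (2 * j) + 1 + 1 by omega,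
      Function.iterate_succ_apply, Function.iterate_succ_apply]

theorem pvPowLoop_rep (k : Nat) : ∀ {b r : List Nat} {gb gr : Nat → Nat}, pvRep b gb → pvRep r gr →
    pvRep (pvPowLoop b r k) (fun v => gr (gb^[k] v)) := by
  induction k using Nat.strong_induction_on with
  | _ k ih =>
    intro b r gb gr hb hr
    rw [pvPowLoop]
    by_cases hk : k = 0
    · subst hk
      simp only [if_pos]
      exact pvRep_congr hr (by simp)
    · rw [if_neg hk]
      by_cases ho : k % 2 = 1
      · rw [if_pos ho]
        have := ih (k / 2) (by omega) (pvMatmul_rep hb hb) (pvMatmul_rep hr hb)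
        refine pvRep_congr this ?_
        intro v
        simp only [pv_iter_sq]
        rw [show (2 : Nat) * (k / 2) = k - 1 by omega,
          ← Function.iterate_succ_apply' gb (k - 1) v, show (k - 1).succ = k by omega]
      · rw [if_neg ho]
        have := ih (k / 2) (by omega) (pvMatmul_rep hb hb) hr
        refine pvRep_congr this ?_
        intro v
        simp only [pv_iter_sq]
        rw [show (2 : Nat) * (k / 2) = k by omega]

theorem pv_getD_map_range {f : Nat → Nat} {i : Nat} (hi : i < 24) :
    (((List.range 24).map f).getD i 0) = f i := by
  rw [List.getD_eq_getElem?_getD, List.getElem?_map, List.getElem?_range hi]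
  simp

theorem pvRep_base : pvRep ((List.range 24).map (fun (i : Nat) => (pvStep ((1 : Int) <<< i)).toNat)) pvStepN := by
  refine ⟨by simp, pvStepN_lin, pvStepN_lt, ?_⟩
  intro i hi
  rw [pv_getD_map_range hi]
  have h1 : ((1 : Int) <<< i) = (((1 <<< i : Nat) : Int)) := rfl
  rw [h1, pvStep_natCast]
  simp

theorem pvRep_id : pvRep ((List.range 24).map (fun i => (1 : Nat) <<< i)) (fun v => v % 16777216) := by
  have hM : (16777216 : Nat) = 2 ^ 24 := by norm_num
  refine ⟨by simp, ?_, ?_, ?_⟩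
  · intro x y
    show (x ^^^ y) % 16777216 = x % 16777216 ^^^ y % 16777216
    rw [hM, ← Nat.and_two_pow_sub_one_eq_mod, ← Nat.and_two_pow_sub_one_eq_mod,
      ← Nat.and_two_pow_sub_one_eq_mod, Nat.and_xor_distrib_right]
  · intro x
    show x % 16777216 < 16777216
    exact Nat.mod_lt _ (by positivity)
  · intro i hi
    show ((List.range 24).map (fun i => (1 : Nat) <<< i)).getD i 0 = (1 <<< i) % 16777216
    rw [pv_getD_map_range hi]
    have : (1 : Nat) <<< i < 16777216 := by
      rw [Nat.shiftLeft_eq, hM, one_mul]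
      exact Nat.pow_lt_pow_right (by omega) hi
    simp [Nat.mod_eq_of_lt this]

theorem pv_iterN_lt (k a : Nat) (h : a < 16777216) : pvStepN^[k] a < 16777216 := by
  cases k with
  | zero => simpa
  | succ k =>
    rw [Function.iterate_succ_apply']
    exact pvStepN_lt _

theorem pv_iter_cast (j : Nat) (a : Nat) : pvStep^[j] (a : Int) = ((pvStepN^[j] a : Nat) : Int) := by
  induction j generalizing a with
  | zero => rfl
  | succ j ih =>
    rw [Function.iterate_succ_apply, Function.iterate_succ_apply, pvStep_natCast, ih]

theorem pv_foldA (l : List Int) (x : Int) :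
    l.foldl (fun n _ =>
      let n1 := pvPrune (pvMix n (n <<< (6 : Nat)))
      let n2 := pvPrune (pvMix n1 (n1 >>> (5 : Nat)))
      pvPrune (pvMix n2 (n2 <<< (11 : Nat)))) x = pvStep^[l.length] x := by
  have hmask : ((2 : Int) ^ 24 - 1) = pvMASK := by decide
  have hb : ∀ m : Int,
      (let n1 := pvPrune (pvMix m (m <<< (6 : Nat)))
       let n2 := pvPrune (pvMix n1 (n1 >>> (5 : Nat)))
       pvPrune (pvMix n2 (n2 <<< (11 : Nat)))) = pvStep m := by
    intro m
    simp only [pvPrune, pvMix, pvStep, hmask]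
  simp only [hb]
  exact pv_foldl_const l pvStep x

-- ===== VERDICT (by name: the statement is the Claim_ definition above) =====
theorem get_secret_n_spec : Claim_equal_get_secret_n := by
  intro n iters _
  show get_secret_n n iters = get_secret_n_alt n iters
  rw [get_secret_n, get_secret_n_alt, pv_foldA, pv_pyRange_len]
  by_cases hit : iters ≤ 0
  · rw [if_pos hit, show iters.toNat = 0 by omega]
    rfl
  · rw [if_neg hit]
    show pvStep^[iters.toNat] n = Int.ofNat (pvMatvec (pvPowLoop
      ((List.range 24).map (fun (i : Nat) => (pvStep ((1 : Int) <<< i)).toNat))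
      ((List.range 24).map (fun (i : Nat) => (1 : Nat) <<< i)) (iters.toNat - 1)) (pvStep n).toNat)
    obtain ⟨hs0, hslt⟩ := pvStep_bounds n
    set s : Nat := (pvStep n).toNat with hs
    have hcast : pvStep n = (s : Int) := by omega
    have hsM : s < 16777216 := by omega
    have hk : iters.toNat = (iters.toNat - 1) + 1 := by omega
    set k : Nat := iters.toNat - 1 with hkdef
    have hrep := pvPowLoop_rep k pvRep_base pvRep_id
    rw [pvMatvec_rep hrep s, Nat.mod_eq_of_lt hsM, Nat.mod_eq_of_lt (pv_iterN_lt k s hsM)]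
    rw [hk, Function.iterate_succ_apply, hcast, pv_iter_cast]
    rfl
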